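-- pv_equiv track=rewrite | github.com/shardpelt/RAAST | CentralSoftware/testFile.py | circumnavigateSonarDetection
-- ===== SOURCE A (Python) =====
-- sonarInfinity = 10
--
-- def circumnavigateSonarDetection(sonar):
--         i = 0 - int(len(sonar) / 2)
--         leftAngle = sonarInfinity
--         rightAngle = sonarInfinity
--         smallestDistance = sonarInfinity
--
--         while i < len(sonar) / 2:
--             if sonar[i] < sonarInfinity:
--                 if sonar [i] < smallestDistance:
--                     smallestDistance = sonar[i]
--                 if leftAngle == sonarInfinity:
--                     leftAngle = i
--                 else:
--                     rightAngle = i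
--
--             i = i + 1
--
--         return [leftAngle, rightAngle, smallestDistance]
-- ===== SOURCE B (Python) =====
-- sonarInfinity = 10
--
-- def circumnavigateSonarDetection(sonar):
--     n = len(sonar)
--     half = n // 2
--     rot = sonar[n - half:] + sonar[:n - half]
--     pl = None
--     for p in range(n):
--         if rot[p] < sonarInfinity:
--             pl = p
--             break
--     if pl is None:
--         return [sonarInfinity, sonarInfinity, sonarInfinity]
--     pr = pl
--     for p in range(n - 1, pl, -1):
--         if rot[p] < sonarInfinity:
--             pr = p
--             break
--     right = pr - half if pr > pl else sonarInfinity
--     return [pl - half, right, min(sonar)]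
-- ===== Notes on version B (the rewrite author's own statement) =====
-- stated objective: alternative
-- what changed: Replaces A's single stateful while loop (four mutable variables updated per signed index) by rotating the readings into scan order once, an early-exit forward scan for the left boundary, an early-exit backward scan for the right boundary, and a global min() of the whole list for the distance.
-- intended difference: On inputs whose first in-range signed index with reading < 10 is exactly 10 (possible only for length >= 23) and with at least one later qualifying index, A's 'leftAngle == sonarInfinity' sentinel collides with the genuine index value 10 so A returns the second qualifying index as leftAngle (rightAngle lagging one behind), while B returns the true first and last qualifying indices, the intended boundaries. — e.g. on circumnavigateSonarDetection([10,10,10,10,10,10,10,10,10,10,5,3,10,10,10,10,10,10,10,10,10,10,10]): A returns [11, 10, 3], B returns [10, 11, 3]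
import Mathlib
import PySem

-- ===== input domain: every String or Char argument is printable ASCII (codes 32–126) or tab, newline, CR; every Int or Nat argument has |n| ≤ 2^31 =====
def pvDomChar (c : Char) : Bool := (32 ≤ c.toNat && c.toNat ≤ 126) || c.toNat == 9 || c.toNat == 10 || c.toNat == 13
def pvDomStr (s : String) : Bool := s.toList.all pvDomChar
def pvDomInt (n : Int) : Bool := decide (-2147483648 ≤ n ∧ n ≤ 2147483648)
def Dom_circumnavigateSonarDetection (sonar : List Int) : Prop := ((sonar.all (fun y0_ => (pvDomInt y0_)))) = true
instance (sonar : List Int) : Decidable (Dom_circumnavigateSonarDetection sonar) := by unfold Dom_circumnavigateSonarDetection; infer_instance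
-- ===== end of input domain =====

-- B replaces A's single stateful sweep by rotating the readings into physical scan order, an
-- early-exit forward scan for the left boundary, an early-exit backward scan for the right
-- boundary, and a global min for the distance; objective: alternative algorithm, same asymptotic cost.

-- ===== PORT A =====
-- while loop ported with a fuel counter (fuel = len+1 ≥ number of iterations); 'i < len(sonar)/2'
-- on integers is exactly '2*i < len'; 'sonar[i]' is always in range when reached from the entry
-- point, so '.getD 0' is never the default there.
def pvLoopA (sonar : List Int) : Nat → Int → Int → Int → Int → List Int
  | 0, _, la, ra, sd => [la, ra, sd]
  | fuel+1, i, la, ra, sd =>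
    if 2 * i < (sonar.length : Int) then
      let v := (PySem.List.pyGet? sonar i).getD 0
      if v < 10 then
        let sd' := if v < sd then v else sd
        if la = 10 then pvLoopA sonar fuel (i+1) i ra sd'
        else pvLoopA sonar fuel (i+1) la i sd'
      else pvLoopA sonar fuel (i+1) la ra sd
    else [la, ra, sd]

def circumnavigateSonarDetection (sonar : List Int) : List Int :=
  pvLoopA sonar (sonar.length + 1) (0 - ((sonar.length : Int) / 2)) 10 10 10

-- ===== PORT B =====
-- 'for p in range(..): if …: pl = p; break' is List.find? over the same range; 'min(sonar)' is
-- PySem.List.min? (called only when the list is nonempty, so '.getD 10' is never the default).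
def circumnavigateSonarDetection_alt (sonar : List Int) : List Int :=
  let n : Int := (sonar.length : Int)
  let half : Int := n / 2
  let rot := PySem.List.slice sonar (some (n - half)) none ++ PySem.List.slice sonar none (some (n - half))
  match (PySem.List.pyRange 0 n 1).find? (fun p => decide ((PySem.List.pyGet? rot p).getD 0 < 10)) with
  | none => [10, 10, 10]
  | some pl =>
    let pr := ((PySem.List.pyRange (n - 1) pl (-1)).find? (fun p => decide ((PySem.List.pyGet? rot p).getD 0 < 10))).getD pl
    let right := if pl < pr then pr - half else 10
    [pl - half, right, (PySem.List.min? sonar (fun v => v)).getD 10]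

-- ===== PRECONDITION & SPEC =====
-- On inputs whose FIRST qualifying signed index is exactly 10 (possible only for length ≥ 23) and
-- with at least one later qualifying index, A's 'leftAngle == sonarInfinity' sentinel collides with
-- the index value 10, so A returns the second qualifying index as leftAngle (rightAngle lagging one
-- behind), while B returns the true first and last qualifying indices, the intended boundaries.
def D_circumnavigateSonarDetection (sonar : List Int) : Prop :=
  let m := sonar.length - sonar.length / 2
  10 < m ∧ (∀ v ∈ sonar.drop m, 10 ≤ v) ∧ (∀ v ∈ sonar.take 10, 10 ≤ v) ∧
    sonar.getD 10 0 < 10 ∧ (∃ v ∈ (sonar.take m).drop 11, v < 10)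
instance (sonar : List Int) : Decidable (D_circumnavigateSonarDetection sonar) := by
  unfold D_circumnavigateSonarDetection; infer_instance

def Spec_circumnavigateSonarDetection (sonar : List Int) (out : List Int) : Prop :=
  ¬ D_circumnavigateSonarDetection sonar → out = circumnavigateSonarDetection_alt sonar
instance (sonar : List Int) (out : List Int) : Decidable (Spec_circumnavigateSonarDetection sonar out) := by
  unfold Spec_circumnavigateSonarDetection; infer_instance

def pvDiffWitness_circumnavigateSonarDetection : List Int :=
  [10,10,10,10,10,10,10,10,10,10,5,3,10,10,10,10,10,10,10,10,10,10,10]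
def pvDiffWitnessOut_circumnavigateSonarDetection : (List Int) × (List Int) :=
  ([11, 10, 3], [10, 11, 3])

-- ===== CLAIM (what is proved, stated in full; the proofs are below) =====
def Claim_unchanged_circumnavigateSonarDetection : Prop := ∀ (sonar : List Int), Dom_circumnavigateSonarDetection sonar → Spec_circumnavigateSonarDetection sonar (circumnavigateSonarDetection sonar)
def Claim_changed_circumnavigateSonarDetection : Prop := Dom_circumnavigateSonarDetection (pvDiffWitness_circumnavigateSonarDetection) ∧ D_circumnavigateSonarDetection (pvDiffWitness_circumnavigateSonarDetection) ∧ circumnavigateSonarDetection (pvDiffWitness_circumnavigateSonarDetection) = pvDiffWitnessOut_circumnavigateSonarDetection.1 ∧ circumnavigateSonarDetection_alt (pvDiffWitness_circumnavigateSonarDetection) = pvDiffWitnessOut_circumnavigateSonarDetection.2 ∧ pvDiffWitnessOut_circumnavigateSonarDetection.1 ≠ pvDiffWitnessOut_circumnavigateSonarDetection.2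
def Claim_exact_circumnavigateSonarDetection : Prop := ∀ (sonar : List Int), Dom_circumnavigateSonarDetection sonar → D_circumnavigateSonarDetection sonar → circumnavigateSonarDetection sonar ≠ circumnavigateSonarDetection_alt sonar

-- ===== LEMMAS AND PROOFS =====

def pvVal (sonar : List Int) (i : Int) : Int := (PySem.List.pyGet? sonar i).getD 0

-- the qualifying signed indices, in A's iteration order (closed form on the input)
def pvQ (sonar : List Int) : List Int :=
  (PySem.List.pyRange (0 - ((sonar.length : Int) / 2)) ((sonar.length : Int) - (sonar.length : Int) / 2) 1).filter
    (fun i => decide ((PySem.List.pyGet? sonar i).getD 0 < 10))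

def pvCore (st : Int × Int × Int) (p : Int × Int) : Int × Int × Int :=
  (if st.1 = 10 then p.1 else st.1,
   if st.1 = 10 then st.2.1 else p.1,
   if p.2 < st.2.2 then p.2 else st.2.2)

theorem pvLoopA_eq (sonar : List Int) : ∀ (fuel : Nat) (i la ra sd : Int),
    (((sonar.length : Int) - (sonar.length : Int) / 2) - i).toNat ≤ fuel →
    pvLoopA sonar fuel i la ra sd =
      (let r := List.foldl
          (fun st j => if pvVal sonar j < 10 then pvCore st (j, pvVal sonar j) else st) (la, ra, sd)
          (PySem.List.pyRange i ((sonar.length : Int) - (sonar.length : Int) / 2) 1)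
       [r.1, r.2.1, r.2.2]) := by
  intro fuel
  induction fuel with
  | zero =>
    intro i la ra sd h
    rw [PySem.List.pyRange_one_eq_nil (by omega)]
    simp [pvLoopA]
  | succ fuel ih =>
    intro i la ra sd h
    by_cases hg : 2 * i < (sonar.length : Int)
    · rw [PySem.List.pyRange_one_cons (by omega)]
      simp only [List.foldl_cons, pvLoopA, if_pos hg, pvVal, pvCore]
      generalize (if (PySem.List.pyGet? sonar i).getD 0 < sd then (PySem.List.pyGet? sonar i).getD 0 else sd) = sd'
      split_ifs with hv hla
      · have := ih (i+1) i ra sd' (by omega)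
        simpa [pvVal, pvCore] using this
      · have := ih (i+1) la i sd' (by omega)
        simpa [pvVal, pvCore] using this
      · have := ih (i+1) la ra sd (by omega)
        simpa [pvVal, pvCore] using this
    · rw [PySem.List.pyRange_one_eq_nil (by omega)]
      simp [pvLoopA, if_neg hg]

theorem pvFold_ne10 (sonar : List Int) (Q : List Int) : ∀ (la ra sd : Int), la ≠ 10 →
    List.foldl (fun st j => pvCore st (j, pvVal sonar j)) (la, ra, sd) Q =
      (la, Q.getLast?.getD ra,
        List.foldl (fun s j => if pvVal sonar j < s then pvVal sonar j else s) sd Q) := by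
  induction Q with
  | nil => intro la ra sd h; simp
  | cons i Q ih =>
    intro la ra sd h
    simp only [List.foldl_cons]
    have hc : pvCore (la, ra, sd) (i, pvVal sonar i)
        = (la, i, if pvVal sonar i < sd then pvVal sonar i else sd) := by
      simp [pvCore, h]
    rw [hc, ih la i _ h]
    cases Q with
    | nil => simp
    | cons j Q =>
      cases h' : (j :: Q).getLast? with
      | none => simp at h'
      | some x => simp [h']

theorem pvGet_sub_len (xs : List Int) (j : Int) (h0 : 0 ≤ j) (h1 : j < (xs.length : Int)) :
    PySem.List.pyGet? xs (j - (xs.length : Int)) = PySem.List.pyGet? xs j := by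
  have hk : j - (xs.length : Int) = -(((xs.length - j.toNat : Nat)) : Int) := by omega
  rw [hk, PySem.List.pyGet?_neg_natCast _ _ (by omega) (by omega), PySem.List.pyGet?_of_nonneg _ h0]
  congr 1
  omega

theorem pvPairs_eq (sonar : List Int) :
    ((PySem.List.pyRange ((sonar.length : Int) - (sonar.length : Int) / 2) (sonar.length : Int) 1).map
        (fun j => (j - (sonar.length : Int), (PySem.List.pyGet? sonar j).getD 0))
      ++ (PySem.List.pyRange 0 ((sonar.length : Int) - (sonar.length : Int) / 2) 1).map
        (fun j => (j, (PySem.List.pyGet? sonar j).getD 0)))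
    = (PySem.List.pyRange (0 - ((sonar.length : Int) / 2)) ((sonar.length : Int) - (sonar.length : Int) / 2) 1).map
        (fun i => (i, pvVal sonar i)) := by
  rw [PySem.List.pyRange_one_append (0 - ((sonar.length : Int) / 2)) 0
      ((sonar.length : Int) - (sonar.length : Int) / 2) (by omega) (by omega)]
  rw [List.map_append]
  congr 1
  · rw [PySem.List.pyRange_one, PySem.List.pyRange_one]
    have hlen : ((sonar.length : Int) - ((sonar.length : Int) - (sonar.length : Int) / 2)).toNat
        = (0 - (0 - (sonar.length : Int) / 2)).toNat := by omega
    rw [hlen, List.map_map, List.map_map]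
    apply List.map_congr_left
    intro k hk
    simp only [List.mem_range] at hk
    simp only [Function.comp, Prod.mk.injEq, pvVal]
    refine ⟨by omega, ?_⟩
    have he : (0 : Int) - (sonar.length : Int) / 2 + k
        = ((sonar.length : Int) - (sonar.length : Int) / 2 + k) - (sonar.length : Int) := by omega
    rw [he, pvGet_sub_len sonar _ (by omega) (by omega)]

-- A's result as independent reductions over pvQ
theorem pvA_eq (sonar : List Int) :
    circumnavigateSonarDetection sonar =
      (let r := List.foldl (fun st j => pvCore st (j, pvVal sonar j)) (10, 10, 10) (pvQ sonar)
       [r.1, r.2.1, r.2.2]) := by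
  unfold circumnavigateSonarDetection
  rw [pvLoopA_eq sonar (sonar.length + 1) _ 10 10 10 (by omega)]
  unfold pvQ
  rw [List.foldl_filter]
  simp [pvVal]

-- ---- B-side machinery: rotation, directional scans, global min ----

theorem pvFind_congr {α : Type} (l : List α) (p q : α → Bool) (h : ∀ x ∈ l, p x = q x) :
    l.find? p = l.find? q := by
  induction l with
  | nil => rfl
  | cons x t ih =>
    have hx := h x List.mem_cons_self
    simp only [List.find?_cons, hx]
    cases q x with
    | true => rfl
    | false => exact ih (fun y hy => h y (List.mem_cons_of_mem _ hy))

theorem pvShiftRange (a b c : Int) :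
    (PySem.List.pyRange a b 1).map (fun x => x + c) = PySem.List.pyRange (a + c) (b + c) 1 := by
  rw [PySem.List.pyRange_one, PySem.List.pyRange_one, List.map_map]
  have h1 : (b + c - (a + c)).toNat = (b - a).toNat := by omega
  rw [h1]
  apply List.map_congr_left
  intro k _
  simp only [Function.comp]
  ring

theorem pvMapRangeSeg (xs : List Int) (a b : Nat) (ha : a ≤ b) (hb : b ≤ xs.length) :
    (PySem.List.pyRange ((a : Nat) : Int) ((b : Nat) : Int) 1).map
        (fun j => (PySem.List.pyGet? xs j).getD 0) = (xs.take b).drop a := by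
  rw [PySem.List.pyRange_one]
  have h1 : (((b : Nat) : Int) - ((a : Nat) : Int)).toNat = b - a := by omega
  rw [h1, List.map_map]
  apply List.ext_getElem
  · simp; omega
  · intro k hk1 hk2
    simp only [List.getElem_map, List.getElem_range, Function.comp]
    have hlen : k < b - a := by simpa using hk1
    have hcast : ((a : Nat) : Int) + ((k : Nat) : Int) = (((a + k : Nat)) : Int) := by push_cast; ring
    rw [hcast, PySem.List.pyGet?_natCast]
    have hlt : a + k < xs.length := by omega
    rw [List.getElem?_eq_getElem hlt]
    simp [List.getElem_drop, List.getElem_take]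

theorem pvMapRangeSeg0 (xs : List Int) (b : Nat) (hb : b ≤ xs.length) :
    (PySem.List.pyRange 0 ((b : Nat) : Int) 1).map
        (fun j => (PySem.List.pyGet? xs j).getD 0) = xs.take b := by
  have h := pvMapRangeSeg xs 0 b (by omega) hb
  simpa using h

-- the rotated reading list IS the signed-index traversal of the sonar
theorem pvRot_eq (sonar : List Int) :
    PySem.List.slice sonar (some ((sonar.length : Int) - (sonar.length : Int) / 2)) none
      ++ PySem.List.slice sonar none (some ((sonar.length : Int) - (sonar.length : Int) / 2))
    = (PySem.List.pyRange (0 - ((sonar.length : Int) / 2)) ((sonar.length : Int) - (sonar.length : Int) / 2) 1).map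
        (pvVal sonar) := by
  have hm : (sonar.length : Int) - (sonar.length : Int) / 2
      = ((sonar.length - sonar.length / 2 : Nat) : Int) := by omega
  have h := congrArg (List.map Prod.snd) (pvPairs_eq sonar)
  rw [List.map_append, List.map_map, List.map_map, List.map_map] at h
  simp only [Function.comp_def] at h
  rw [hm, PySem.List.slice_from_natCast, PySem.List.slice_to_natCast]
  rw [hm] at h
  rw [pvMapRangeSeg sonar (sonar.length - sonar.length / 2) sonar.length (by omega) (by omega)] at h
  rw [pvMapRangeSeg0 sonar (sonar.length - sonar.length / 2) (by omega)] at h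
  simpa using h

theorem pvRotGet (sonar : List Int) (p : Int) (h0 : 0 ≤ p) (h1 : p < (sonar.length : Int)) :
    ((PySem.List.pyGet?
        ((PySem.List.pyRange (0 - ((sonar.length : Int) / 2)) ((sonar.length : Int) - (sonar.length : Int) / 2) 1).map
          (pvVal sonar)) p).getD 0)
      = pvVal sonar (p - (sonar.length : Int) / 2) := by
  rw [PySem.List.pyGet?_of_nonneg _ h0]
  have hlen : p.toNat < ((PySem.List.pyRange (0 - ((sonar.length : Int) / 2)) ((sonar.length : Int) - (sonar.length : Int) / 2) 1).map (pvVal sonar)).length := by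
    simp [PySem.List.length_pyRange_one]
    omega
  rw [List.getElem?_eq_getElem hlen]
  simp only [List.getElem_map, PySem.List.getElem_pyRange_one, Option.getD_some]
  congr 1
  omega

-- the forward scan finds the first qualifying signed index, shifted by half
theorem pvFind_fwd (sonar : List Int) :
    (PySem.List.pyRange 0 (sonar.length : Int) 1).find?
        (fun p => decide (((PySem.List.pyGet?
          ((PySem.List.pyRange (0 - ((sonar.length : Int) / 2)) ((sonar.length : Int) - (sonar.length : Int) / 2) 1).map
            (pvVal sonar)) p).getD 0) < 10))
      = ((pvQ sonar).head?).map (fun x => x + (sonar.length : Int) / 2) := by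
  have hr : PySem.List.pyRange 0 (sonar.length : Int) 1
      = (PySem.List.pyRange (0 - ((sonar.length : Int) / 2)) ((sonar.length : Int) - (sonar.length : Int) / 2) 1).map
          (fun x => x + (sonar.length : Int) / 2) := by
    rw [pvShiftRange]
    congr 1 <;> ring
  rw [hr, List.find?_map]
  rw [pvFind_congr _ _ (fun i => decide ((PySem.List.pyGet? sonar i).getD 0 < 10)) ?_]
  · rw [← List.head?_filter]
    rfl
  · intro i hi
    rw [PySem.List.mem_pyRange_one] at hi
    simp only [Function.comp]
    rw [pvRotGet sonar (i + (sonar.length : Int) / 2) (by omega) (by omega)]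
    simp [pvVal]

-- pvQ is strictly increasing
theorem pvQ_pairwise (sonar : List Int) : (pvQ sonar).Pairwise (· < ·) := by
  unfold pvQ
  exact (PySem.List.pairwise_lt_pyRange_one _ _).filter _

-- the tail of pvQ is the filter of the strictly-later range
theorem pvRest (sonar : List Int) (i0 : Int) (rest : List Int) (hQ : pvQ sonar = i0 :: rest) :
    rest = (PySem.List.pyRange (i0 + 1) ((sonar.length : Int) - (sonar.length : Int) / 2) 1).filter
      (fun i => decide ((PySem.List.pyGet? sonar i).getD 0 < 10)) := by
  have hmem : i0 ∈ pvQ sonar := by rw [hQ]; exact List.mem_cons_self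
  have hb : 0 - ((sonar.length : Int) / 2) ≤ i0 ∧ i0 < (sonar.length : Int) - (sonar.length : Int) / 2 := by
    unfold pvQ at hmem
    have := List.mem_of_mem_filter hmem
    rwa [PySem.List.mem_pyRange_one] at this
  have hq0 : decide ((PySem.List.pyGet? sonar i0).getD 0 < 10) = true := by
    unfold pvQ at hmem
    simpa using List.of_mem_filter hmem
  have hsplit : pvQ sonar
      = (PySem.List.pyRange (0 - ((sonar.length : Int) / 2)) i0 1).filter
          (fun i => decide ((PySem.List.pyGet? sonar i).getD 0 < 10))
        ++ (PySem.List.pyRange i0 ((sonar.length : Int) - (sonar.length : Int) / 2) 1).filter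
          (fun i => decide ((PySem.List.pyGet? sonar i).getD 0 < 10)) := by
    unfold pvQ
    rw [PySem.List.pyRange_one_append (0 - ((sonar.length : Int) / 2)) i0
        ((sonar.length : Int) - (sonar.length : Int) / 2) (by omega) (by omega), List.filter_append]
  rw [hQ] at hsplit
  rcases hA : (PySem.List.pyRange (0 - ((sonar.length : Int) / 2)) i0 1).filter
      (fun i => decide ((PySem.List.pyGet? sonar i).getD 0 < 10)) with _ | ⟨a, A'⟩
  · rw [hA, List.nil_append] at hsplit
    rw [PySem.List.pyRange_one_cons (by omega), List.filter_cons] at hsplit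
    rw [if_pos hq0] at hsplit
    simp only [List.cons.injEq] at hsplit
    exact hsplit.2
  · exfalso
    have ha : a ∈ PySem.List.pyRange (0 - ((sonar.length : Int) / 2)) i0 1 := by
      have : a ∈ (PySem.List.pyRange (0 - ((sonar.length : Int) / 2)) i0 1).filter
          (fun i => decide ((PySem.List.pyGet? sonar i).getD 0 < 10)) := by
        rw [hA]; exact List.mem_cons_self
      exact List.mem_of_mem_filter this
    rw [PySem.List.mem_pyRange_one] at ha
    rw [hA, List.cons_append] at hsplit
    have : i0 = a := (List.cons.injEq _ _ _ _).mp hsplit |>.1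
    omega

-- the backward scan finds the last qualifying signed index after i0, shifted by half
theorem pvFind_bwd (sonar : List Int) (i0 : Int) (rest : List Int) (hQ : pvQ sonar = i0 :: rest) :
    (PySem.List.pyRange ((sonar.length : Int) - 1) (i0 + (sonar.length : Int) / 2) (-1)).find?
        (fun p => decide (((PySem.List.pyGet?
          ((PySem.List.pyRange (0 - ((sonar.length : Int) / 2)) ((sonar.length : Int) - (sonar.length : Int) / 2) 1).map
            (pvVal sonar)) p).getD 0) < 10))
      = (rest.getLast?).map (fun x => x + (sonar.length : Int) / 2) := by
  have hmem : i0 ∈ pvQ sonar := by rw [hQ]; exact List.mem_cons_self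
  have hb : 0 - ((sonar.length : Int) / 2) ≤ i0 ∧ i0 < (sonar.length : Int) - (sonar.length : Int) / 2 := by
    unfold pvQ at hmem
    have := List.mem_of_mem_filter hmem
    rwa [PySem.List.mem_pyRange_one] at this
  rw [PySem.List.pyRange_neg_one_eq_reverse]
  have he : i0 + (sonar.length : Int) / 2 + 1 = (i0 + 1) + (sonar.length : Int) / 2 := by ring
  have he2 : (sonar.length : Int) - 1 + 1 = ((sonar.length : Int) - (sonar.length : Int) / 2) + (sonar.length : Int) / 2 := by ring
  rw [he, he2, ← pvShiftRange (i0 + 1) ((sonar.length : Int) - (sonar.length : Int) / 2) ((sonar.length : Int) / 2)]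
  rw [← List.map_reverse, List.find?_map]
  rw [pvFind_congr _ _ (fun i => decide ((PySem.List.pyGet? sonar i).getD 0 < 10)) ?_]
  · rw [← List.head?_filter, List.filter_reverse, List.head?_reverse]
    rw [← pvRest sonar i0 rest hQ]
  · intro i hi
    rw [List.mem_reverse, PySem.List.mem_pyRange_one] at hi
    simp only [Function.comp]
    rw [pvRotGet sonar (i + (sonar.length : Int) / 2) (by omega) (by omega)]
    simp [pvVal]

-- ---- min machinery ----

theorem pvFoldMin (l : List Int) (a : Int) :
    List.foldl (fun s v => if v < s then v else s) a l = l.foldl min a := by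
  induction l generalizing a with
  | nil => rfl
  | cons v l ih =>
    simp only [List.foldl_cons]
    rw [ih]
    congr 1
    omega

theorem pvFoldMinFilter (l : List Int) : ∀ (a : Int), a ≤ 10 →
    (l.filter (fun v => decide (v < 10))).foldl min a = l.foldl min a := by
  induction l with
  | nil => intro a _; rfl
  | cons v t ih =>
    intro a ha
    by_cases hv : v < 10
    · rw [List.filter_cons_of_pos (by simpa using hv)]
      simp only [List.foldl_cons]
      exact ih (min a v) (by omega)
    · rw [List.filter_cons_of_neg (by simpa using hv)]
      simp only [List.foldl_cons]
      have : min a v = a := by omega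
      rw [this]
      exact ih a ha

theorem pvFoldMin_le_init (l : List Int) : ∀ (a : Int), l.foldl min a ≤ a := by
  induction l with
  | nil => intro a; simp
  | cons v t ih =>
    intro a
    simp only [List.foldl_cons]
    have := ih (min a v)
    omega

theorem pvFoldMin_le_mem (l : List Int) : ∀ (a v : Int), v ∈ l → l.foldl min a ≤ v := by
  induction l with
  | nil => intro a v hv; simp at hv
  | cons x t ih =>
    intro a v hv
    simp only [List.foldl_cons]
    rcases List.mem_cons.mp hv with h | h
    · subst h
      have := pvFoldMin_le_init t (min a v)
      omega
    · exact ih (min a x) v h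

theorem pvFoldMin_shift (l : List Int) : ∀ (a b : Int),
    l.foldl min (min a b) = min a (l.foldl min b) := by
  induction l with
  | nil => intro a b; simp
  | cons v t ih =>
    intro a b
    simp only [List.foldl_cons]
    have h : min (min a b) v = min a (min b v) := by omega
    rw [h, ih]

theorem pvVal_mem (sonar : List Int) (i : Int) (hi : i ∈ pvQ sonar) : pvVal sonar i ∈ sonar := by
  unfold pvQ at hi
  have hr := List.mem_of_mem_filter hi
  rw [PySem.List.mem_pyRange_one] at hr
  unfold pvVal
  rcases h : PySem.List.pyGet? sonar i with _ | v
  · rw [PySem.List.pyGet?_eq_none_iff] at h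
    exfalso
    exact h (by constructor <;> omega)
  · simp only [Option.getD_some]
    exact PySem.List.mem_of_pyGet?_eq_some _ h

theorem pvQ_val_lt (sonar : List Int) (i : Int) (hi : i ∈ pvQ sonar) : pvVal sonar i < 10 := by
  unfold pvQ at hi
  have := List.of_mem_filter hi
  simpa [pvVal] using this

-- the global min of the sonar equals A's running min over the qualifying values
theorem pvMin_eq (sonar : List Int) (i0 : Int) (rest : List Int) (hQ : pvQ sonar = i0 :: rest) :
    (PySem.List.min? sonar (fun v => v)).getD 10
      = ((pvQ sonar).map (pvVal sonar)).foldl min 10 := by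
  have hperm : ((PySem.List.pyRange (0 - ((sonar.length : Int) / 2)) ((sonar.length : Int) - (sonar.length : Int) / 2) 1).map
      (pvVal sonar)).Perm sonar := by
    rw [← pvRot_eq]
    have hm : (sonar.length : Int) - (sonar.length : Int) / 2
        = ((sonar.length - sonar.length / 2 : Nat) : Int) := by omega
    rw [hm, PySem.List.slice_from_natCast, PySem.List.slice_to_natCast]
    have h1 : (sonar.drop (sonar.length - sonar.length / 2) ++ sonar.take (sonar.length - sonar.length / 2)).Perm
        (sonar.take (sonar.length - sonar.length / 2) ++ sonar.drop (sonar.length - sonar.length / 2)) :=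
      List.perm_append_comm
    rw [List.take_append_drop] at h1
    exact h1
  have hmap : (pvQ sonar).map (pvVal sonar)
      = ((PySem.List.pyRange (0 - ((sonar.length : Int) / 2)) ((sonar.length : Int) - (sonar.length : Int) / 2) 1).map
          (pvVal sonar)).filter (fun v => decide (v < 10)) := by
    unfold pvQ
    rw [List.filter_map]
    congr 1
  rw [hmap, pvFoldMinFilter _ 10 (by omega)]
  rw [hperm.foldl_eq 10]
  have hmem : pvVal sonar i0 ∈ sonar := pvVal_mem sonar i0 (by rw [hQ]; exact List.mem_cons_self)
  have hlt : pvVal sonar i0 < 10 := pvQ_val_lt sonar i0 (by rw [hQ]; exact List.mem_cons_self)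
  have hne : sonar ≠ [] := by rintro rfl; simp at hmem
  obtain ⟨x, t, hs⟩ := List.exists_cons_of_ne_nil hne
  generalize hmem' : pvVal sonar i0 = w at hmem hlt
  rw [hs, PySem.List.min?_id_cons, Option.getD_some, List.foldl_cons]
  rw [pvFoldMin_shift t 10 x]
  rw [hs] at hmem
  have h2 : t.foldl min x ≤ w := by
    rcases List.mem_cons.mp hmem with h | h
    · rw [h]; exact pvFoldMin_le_init t x
    · exact pvFoldMin_le_mem t x _ h
  omega

-- B's result case by case over pvQ
theorem pvB_nil (sonar : List Int) (h : pvQ sonar = []) :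
    circumnavigateSonarDetection_alt sonar = [10, 10, 10] := by
  simp only [circumnavigateSonarDetection_alt]
  rw [pvRot_eq, pvFind_fwd, h]
  rfl

theorem pvB_cons (sonar : List Int) (i0 : Int) (rest : List Int) (hQ : pvQ sonar = i0 :: rest) :
    circumnavigateSonarDetection_alt sonar
      = [i0, rest.getLast?.getD 10, (PySem.List.min? sonar (fun v => v)).getD 10] := by
  simp only [circumnavigateSonarDetection_alt]
  rw [pvRot_eq, pvFind_fwd, hQ]
  simp only [List.head?_cons, Option.map_some]
  rw [pvFind_bwd sonar i0 rest hQ]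
  have hp := pvQ_pairwise sonar
  rw [hQ] at hp
  cases hL : rest.getLast? with
  | none =>
    simp only [Option.map_none, Option.getD_none]
    have hc : ¬ (i0 + (sonar.length : Int) / 2 < i0 + (sonar.length : Int) / 2) := by omega
    rw [if_neg hc]
    have h1 : i0 + (sonar.length : Int) / 2 - (sonar.length : Int) / 2 = i0 := by ring
    rw [h1]
  | some j =>
    have hjmem : j ∈ rest := List.mem_of_getLast? hL
    have hij : i0 < j := (List.pairwise_cons.mp hp).1 j hjmem
    simp only [Option.map_some, Option.getD_some]
    have hc : i0 + (sonar.length : Int) / 2 < j + (sonar.length : Int) / 2 := by omega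
    rw [if_pos hc]
    have h1 : i0 + (sonar.length : Int) / 2 - (sonar.length : Int) / 2 = i0 := by ring
    have h2 : j + (sonar.length : Int) / 2 - (sonar.length : Int) / 2 = j := by ring
    rw [h1, h2]

theorem pvQ_mem (sonar : List Int) (i : Int) :
    i ∈ pvQ sonar ↔ (0 - (sonar.length : Int) / 2 ≤ i ∧ i < (sonar.length : Int) - (sonar.length : Int) / 2
      ∧ pvVal sonar i < 10) := by
  unfold pvQ
  simp [List.mem_filter, PySem.List.mem_pyRange_one, pvVal, and_assoc]

theorem pvVal_pos (sonar : List Int) (K : Nat) (hK : K < sonar.length) :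
    pvVal sonar (K : Int) = sonar[K]'hK := by
  unfold pvVal
  rw [PySem.List.pyGet?_of_nonneg _ (by omega), show ((K : Int).toNat) = K from by omega,
    List.getElem?_eq_getElem hK]
  rfl

theorem pvVal_neg (sonar : List Int) (K : Nat) (hK : K < sonar.length) :
    pvVal sonar ((K : Int) - (sonar.length : Int)) = sonar[K]'hK := by
  have h2 := pvGet_sub_len sonar (K : Int) (by omega) (by omega)
  unfold pvVal
  rw [h2, PySem.List.pyGet?_of_nonneg _ (by omega), show ((K : Int).toNat) = K from by omega,
    List.getElem?_eq_getElem hK]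
  rfl

theorem pvQ_pos_iff (sonar : List Int) (K : Nat) (h1 : K < sonar.length - sonar.length / 2) :
    ((K : Int) ∈ pvQ sonar) ↔ sonar[K]'(by omega) < 10 := by
  rw [pvQ_mem, pvVal_pos sonar K (by omega)]
  constructor
  · rintro ⟨_, _, h⟩; exact h
  · intro h; exact ⟨by omega, by omega, h⟩

theorem pvQ_neg_iff (sonar : List Int) (K : Nat) (h0 : sonar.length - sonar.length / 2 ≤ K)
    (h1 : K < sonar.length) :
    (((K : Int) - (sonar.length : Int)) ∈ pvQ sonar) ↔ sonar[K]'h1 < 10 := by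
  rw [pvQ_mem, pvVal_neg sonar K h1]
  constructor
  · rintro ⟨_, _, h⟩; exact h
  · intro h; exact ⟨by omega, by omega, h⟩

theorem pvMem_drop_iff (l : List Int) (s : Nat) (v : Int) :
    v ∈ l.drop s ↔ ∃ K, s ≤ K ∧ ∃ h : K < l.length, l[K]'h = v := by
  rw [List.mem_iff_getElem?]
  constructor
  · rintro ⟨j, hj⟩
    rw [List.getElem?_drop] at hj
    obtain ⟨h, hE⟩ := List.getElem?_eq_some_iff.mp hj
    exact ⟨s + j, by omega, h, hE⟩
  · rintro ⟨K, hs, h, hE⟩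
    refine ⟨K - s, ?_⟩
    rw [List.getElem?_drop, show s + (K - s) = K from by omega]
    exact List.getElem?_eq_some_iff.mpr ⟨h, hE⟩

theorem pvMem_take_iff (l : List Int) (t : Nat) (v : Int) :
    v ∈ l.take t ↔ ∃ K, K < t ∧ ∃ h : K < l.length, l[K]'h = v := by
  rw [List.mem_iff_getElem?]
  constructor
  · rintro ⟨j, hj⟩
    rw [List.getElem?_take] at hj
    by_cases hjt : j < t
    · rw [if_pos hjt] at hj
      obtain ⟨h, hE⟩ := List.getElem?_eq_some_iff.mp hj
      exact ⟨j, hjt, h, hE⟩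
    · rw [if_neg hjt] at hj; simp at hj
  · rintro ⟨K, ht, h, hE⟩
    refine ⟨K, ?_⟩
    rw [List.getElem?_take, if_pos ht]
    exact List.getElem?_eq_some_iff.mpr ⟨h, hE⟩

theorem pvMem_drop_take_iff (l : List Int) (s t : Nat) (v : Int) :
    v ∈ (l.take t).drop s ↔ ∃ K, s ≤ K ∧ K < t ∧ ∃ h : K < l.length, l[K]'h = v := by
  constructor
  · intro hv
    obtain ⟨K, hs, hK, hE⟩ := (pvMem_drop_iff _ s v).mp hv
    have hKt : K < t ∧ K < l.length := by simp [List.length_take] at hK; omega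
    rw [List.getElem_take] at hE
    exact ⟨K, hs, hKt.1, hKt.2, hE⟩
  · rintro ⟨K, hs, ht, h, hE⟩
    apply (pvMem_drop_iff _ s v).mpr
    refine ⟨K, hs, ?_, ?_⟩
    · simp [List.length_take]; omega
    · rw [List.getElem_take]; exact hE


-- the D_ region in terms of pvQ: first qualifying index is 10 and a second one exists
theorem pvD_iff (sonar : List Int) :
    D_circumnavigateSonarDetection sonar ↔
      ((pvQ sonar).head? = some 10 ∧ 2 ≤ (pvQ sonar).length) := by
  have hp : (pvQ sonar).Pairwise (· < ·) := pvQ_pairwise sonar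
  unfold D_circumnavigateSonarDetection
  constructor
  · rintro ⟨hm, hC1, hC2, hC3, v, hvmem, hv⟩
    have h10L : 10 < sonar.length := by omega
    have hQ10' : (10 : Int) ∈ pvQ sonar := by
      have : ((10 : Nat) : Int) ∈ pvQ sonar := by
        rw [pvQ_pos_iff sonar 10 (by omega)]
        rw [List.getD_eq_getElem sonar 0 h10L] at hC3
        exact hC3
      simpa using this
    have hge : ∀ j ∈ pvQ sonar, (10 : Int) ≤ j := by
      intro j hj
      by_contra hlt
      push_neg at hlt
      have hj' := (pvQ_mem sonar j).mp hj
      rcases lt_or_ge j 0 with hneg | hpos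
      · have hKb : sonar.length - sonar.length / 2 ≤ (j + (sonar.length : Int)).toNat ∧
            (j + (sonar.length : Int)).toNat < sonar.length := by omega
        have hjK : j = (((j + (sonar.length : Int)).toNat : Int)) - (sonar.length : Int) := by omega
        rw [hjK, pvQ_neg_iff sonar _ hKb.1 hKb.2] at hj
        have hmem : sonar[(j + (sonar.length : Int)).toNat]'hKb.2 ∈
            sonar.drop (sonar.length - sonar.length / 2) :=
          (pvMem_drop_iff sonar _ _).mpr ⟨_, hKb.1, hKb.2, rfl⟩
        have := hC1 _ hmem
        omega
      · have hjK : j = ((j.toNat : Nat) : Int) := by omega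
        rw [hjK, pvQ_pos_iff sonar j.toNat (by omega)] at hj
        have hmem : sonar[j.toNat]'(by omega) ∈ sonar.take 10 :=
          (pvMem_take_iff sonar 10 _).mpr ⟨j.toNat, by omega, by omega, rfl⟩
        have := hC2 _ hmem
        omega
    obtain ⟨K, hK11, hKm, hKL, hKE⟩ := (pvMem_drop_take_iff sonar 11 _ v).mp hvmem
    have hKQ : ((K : Nat) : Int) ∈ pvQ sonar := by
      rw [pvQ_pos_iff sonar K (by omega), hKE]
      exact hv
    rcases hQh : pvQ sonar with _ | ⟨h0, t⟩
    · rw [hQh] at hQ10'; simp at hQ10'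
    · rw [hQh] at hQ10' hge hp hKQ
      have hh0 : h0 = 10 := by
        rcases List.mem_cons.mp hQ10' with h | h
        · omega
        · have h1 := (List.pairwise_cons.mp hp).1 10 h
          have h2 := hge h0 List.mem_cons_self
          omega
      refine ⟨by simp [hh0], ?_⟩
      rcases List.mem_cons.mp hKQ with h | h
      · exfalso; omega
      · cases t with
        | nil => simp at h
        | cons a t' => simp
  · rintro ⟨hh, hl⟩
    rcases hQh : pvQ sonar with _ | ⟨h0, t⟩
    · rw [hQh] at hh; simp at hh
    · rw [hQh] at hh hl hp
      simp only [List.head?_cons, Option.some.injEq] at hh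
      subst hh
      have hQ10 : (10 : Int) ∈ pvQ sonar := by rw [hQh]; exact List.mem_cons_self
      have hb := (pvQ_mem sonar 10).mp hQ10
      have h10L : 10 < sonar.length := by omega
      have hm : 10 < sonar.length - sonar.length / 2 := by omega
      refine ⟨hm, ?_, ?_, ?_, ?_⟩
      · intro v hv
        by_contra hlt
        push_neg at hlt
        obtain ⟨K, hsK, hKL, hKE⟩ := (pvMem_drop_iff sonar _ v).mp hv
        have hmemQ : ((K : Int) - (sonar.length : Int)) ∈ pvQ sonar := by
          rw [pvQ_neg_iff sonar K hsK hKL, hKE]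
          exact hlt
        rw [hQh] at hmemQ
        rcases List.mem_cons.mp hmemQ with h | h
        · omega
        · have := (List.pairwise_cons.mp hp).1 _ h
          omega
      · intro v hv
        by_contra hlt
        push_neg at hlt
        obtain ⟨K, hKt, hKL, hKE⟩ := (pvMem_take_iff sonar 10 v).mp hv
        have hmemQ : ((K : Nat) : Int) ∈ pvQ sonar := by
          rw [pvQ_pos_iff sonar K (by omega), hKE]
          exact hlt
        rw [hQh] at hmemQ
        rcases List.mem_cons.mp hmemQ with h | h
        · omega
        · have := (List.pairwise_cons.mp hp).1 _ h
          omega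
      · rw [List.getD_eq_getElem sonar 0 h10L]
        exact (pvQ_pos_iff sonar 10 (by omega)).mp (by simpa using hQ10)
      · cases t with
        | nil => simp at hl
        | cons i1 t' =>
          have hi1Q : i1 ∈ pvQ sonar := by
            rw [hQh]; exact List.mem_cons_of_mem _ List.mem_cons_self
          have hb1 := (pvQ_mem sonar i1).mp hi1Q
          have h10i1 : (10 : Int) < i1 := (List.pairwise_cons.mp hp).1 i1 List.mem_cons_self
          have hKm : i1.toNat < sonar.length - sonar.length / 2 := by omega
          have hKQ : ((i1.toNat : Nat) : Int) ∈ pvQ sonar := by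
            rw [show ((i1.toNat : Int)) = i1 from by omega]
            exact hi1Q
          have hless := (pvQ_pos_iff sonar i1.toNat hKm).mp hKQ
          exact ⟨sonar[i1.toNat]'(by omega),
            (pvMem_drop_take_iff sonar 11 _ _).mpr ⟨i1.toNat, by omega, hKm, by omega, rfl⟩, hless⟩

-- ===== VERDICT (by name: the statement is the Claim_ definition above) =====
theorem circumnavigateSonarDetection_spec : Claim_unchanged_circumnavigateSonarDetection := by
  intro sonar _ hnd
  rw [pvA_eq]
  rcases hQ : pvQ sonar with _ | ⟨i0, rest⟩
  · rw [pvB_nil sonar hQ]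
    simp
  · rw [pvB_cons sonar i0 rest hQ, pvMin_eq sonar i0 rest hQ, hQ]
    have hv0 : pvVal sonar i0 < 10 := pvQ_val_lt sonar i0 (by rw [hQ]; exact List.mem_cons_self)
    rcases rest with _ | ⟨i1, rest'⟩
    · simp only [List.foldl_cons, List.foldl_nil, List.map_cons, List.map_nil]
      have h1 : pvCore (10, 10, 10) (i0, pvVal sonar i0) = (i0, 10, pvVal sonar i0) := by
        simp [pvCore, hv0]
      rw [h1]
      have h3 : min 10 (pvVal sonar i0) = pvVal sonar i0 := by omega
      simp [h3]
    · have hne : i0 ≠ 10 := by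
        intro hc
        exact hnd ((pvD_iff sonar).mpr ⟨by rw [hQ]; simp [hc], by rw [hQ]; simp⟩)
      have hv1 : pvVal sonar i1 < 10 :=
        pvQ_val_lt sonar i1 (by rw [hQ]; exact List.mem_cons_of_mem _ List.mem_cons_self)
      simp only [List.foldl_cons, List.map_cons]
      have h1 : pvCore (10, 10, 10) (i0, pvVal sonar i0) = (i0, 10, pvVal sonar i0) := by
        simp [pvCore, hv0]
      rw [h1]
      have h2 : pvCore (i0, 10, pvVal sonar i0) (i1, pvVal sonar i1)
          = (i0, i1, if pvVal sonar i1 < pvVal sonar i0 then pvVal sonar i1 else pvVal sonar i0) := by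
        simp [pvCore, hne]
      rw [h2, pvFold_ne10 sonar rest' i0 i1 _ hne]
      have hsec : rest'.getLast?.getD i1 = (i1 :: rest').getLast?.getD 10 := by
        cases hx : rest'.getLast? with
        | none =>
          have hr : rest' = [] := by simpa using hx
          subst hr
          simp
        | some x => simp [List.getLast?_cons, hx]
      have hmin : List.foldl (fun s j => if pvVal sonar j < s then pvVal sonar j else s)
          (if pvVal sonar i1 < pvVal sonar i0 then pvVal sonar i1 else pvVal sonar i0) rest'
          = (rest'.map (pvVal sonar)).foldl min (min (min 10 (pvVal sonar i0)) (pvVal sonar i1)) := by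
        have h := pvFoldMin (rest'.map (pvVal sonar))
          (min (min 10 (pvVal sonar i0)) (pvVal sonar i1))
        rw [List.foldl_map] at h
        rw [← h]
        congr 1
        omega
      dsimp only
      rw [hsec, hmin]
  
theorem circumnavigateSonarDetection_changed : Claim_changed_circumnavigateSonarDetection := by
  unfold Claim_changed_circumnavigateSonarDetection; decide

theorem circumnavigateSonarDetection_tight : Claim_exact_circumnavigateSonarDetection := by
  intro sonar _ hd
  obtain ⟨hh, hl⟩ := (pvD_iff sonar).mp hd
  rw [pvA_eq]
  rcases hQ : pvQ sonar with _ | ⟨i0, rest⟩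
  · rw [hQ] at hh; simp at hh
  · rw [hQ] at hh hl
    simp only [List.head?_cons, Option.some.injEq] at hh
    subst hh
    rw [pvB_cons sonar 10 rest hQ]
    rcases rest with _ | ⟨i1, rest'⟩
    · simp at hl
    · have hv0 : pvVal sonar 10 < 10 := pvQ_val_lt sonar 10 (by rw [hQ]; exact List.mem_cons_self)
      have hp := pvQ_pairwise sonar
      rw [hQ] at hp
      have h10 : (10 : Int) < i1 := by
        rw [List.pairwise_cons] at hp
        exact hp.1 i1 List.mem_cons_self
      simp only [List.foldl_cons]
      have h1 : pvCore (10, 10, 10) (10, pvVal sonar 10) = (10, 10, pvVal sonar 10) := by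
        simp [pvCore, hv0]
      rw [h1]
      have h2 : pvCore (10, 10, pvVal sonar 10) (i1, pvVal sonar i1)
          = (i1, 10, if pvVal sonar i1 < pvVal sonar 10 then pvVal sonar i1 else pvVal sonar 10) := by
        simp [pvCore]
      rw [h2, pvFold_ne10 sonar rest' i1 10 _ (by omega)]
      intro hEq
      have := (List.cons_eq_cons.mp hEq).1
      simp only at this
      omega
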